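-- pv_equiv track=rewrite | github.com/Icex0/OpenFirebase | openfirebase/extractors/jadx_extractor.py | _should_skip_firestore_code_patterns
-- ===== SOURCE A (Python) =====
-- def _should_skip_firestore_code_patterns(header: str, link: str) -> bool:
--     """Check if Firestore link should be skipped due to code-like patterns."""
--     if not header.startswith("Firestore_"):
--         return False
--
--     link_clean = link.strip()
--
--     # Skip if it looks like code concatenation (contains operators with spaces)
--     if any(op in link for op in [" + ", " - ", " * ", " / ", " & ", " | ", " = "]):
--         return True
--
--     # Skip if it starts or ends with common code artifacts
--     code_chars = (
--         "+", "-", "_", "*", "/", "&", "|", "=", ",", ";",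
--         "(", ")", "[", "]", "{", "}", ".", "<", ">"
--     )
--     if link_clean.startswith(code_chars) or link_clean.endswith(code_chars):
--         return True
--
--     # Skip common code keywords and method-like patterns
--     if (link_clean.lower() in ["this", "self", "that", "null", "true", "false", "void"]
--         or "valueOf" in link_clean
--         or "toString" in link_clean
--         or "getString" in link_clean):
--         return True
--
--     # Skip very generic single character or short patterns
--     if len(link_clean) <= 2 or link_clean.isdigit():
--         return True
--
--     # Skip if it contains multiple consecutive special characters (likely code fragment)
--     if any(char1 + char2 in link
--            for char1 in ",;()[]{}."
--            for char2 in ",;()[]{}."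
--            if char1 != char2):
--         return True
--
--     return False
-- ===== SOURCE B (Python) =====
-- _SPECIALS = ",;()[]{}."
-- _OPS = "+-*/&|="
-- _EDGE = "+-_*/&|=,;()[]{}.<>"
-- _KEYWORDS = ("this", "self", "that", "null", "true", "false", "void")
--
--
-- def _should_skip_firestore_code_patterns(header: str, link: str) -> bool:
--     """Check if Firestore link should be skipped due to code-like patterns."""
--     if not header.startswith("Firestore_"):
--         return False
--
--     s = link.strip()
--
--     # One left-to-right pass over link with a two-character lookback replaces
--     # both substring searches (" op " operators and adjacent distinct specials).
--     prev2 = None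
--     prev = None
--     for c in link:
--         if prev2 == " " and c == " " and prev is not None and prev in _OPS:
--             return True
--         if (prev is not None and prev in _SPECIALS and c in _SPECIALS
--                 and prev != c):
--             return True
--         prev2, prev = prev, c
--
--     # First/last character of the stripped link in the code-artifact set.
--     if s and (s[0] in _EDGE or s[-1] in _EDGE):
--         return True
--
--     # Code keywords and method-like patterns.
--     if (s.lower() in _KEYWORDS or "valueOf" in s or "toString" in s
--             or "getString" in s):
--         return True
--
--     # Very short or purely numeric.
--     return len(s) <= 2 or s.isdigit()
-- ===== Notes on version B (the rewrite author's own statement) =====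
-- stated objective: alternative
-- what changed: The two substring searches (the 7-string ' op ' operator scan and the 9x9 nested pair-of-specials substring scan) are replaced by one left-to-right pass over link with a two-character lookback, and the 19-prefix/19-suffix startswith/endswith tuple tests are replaced by a membership test on the first and last character of the stripped link.
import Mathlib
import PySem

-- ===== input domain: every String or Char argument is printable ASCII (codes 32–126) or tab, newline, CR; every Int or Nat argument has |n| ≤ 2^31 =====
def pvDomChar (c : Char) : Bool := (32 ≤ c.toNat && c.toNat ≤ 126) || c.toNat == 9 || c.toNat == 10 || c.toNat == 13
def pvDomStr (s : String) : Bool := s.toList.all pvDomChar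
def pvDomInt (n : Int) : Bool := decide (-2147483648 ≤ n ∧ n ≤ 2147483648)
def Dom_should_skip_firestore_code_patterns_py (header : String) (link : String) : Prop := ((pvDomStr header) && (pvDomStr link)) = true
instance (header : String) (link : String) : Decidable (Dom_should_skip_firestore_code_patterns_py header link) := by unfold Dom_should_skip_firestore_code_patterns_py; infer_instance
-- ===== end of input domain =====

-- B replaces the two substring searches (the " op " operator list and the nested
-- pair-of-specials scan) by ONE left-to-right pass over `link` with a two-character
-- lookback, and replaces the 19-prefix/19-suffix startswith/endswith tuple test by a
-- membership test on the first and last character of the stripped link (objective: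
-- alternative decomposition; same asymptotic cost).

-- ===== PORT A =====
def should_skip_firestore_code_patterns_py (header : String) (link : String) : Bool :=
  if !(PySem.Str.startswith header "Firestore_") then false
  else
    let link_clean := PySem.Str.strip link
    if [" + ", " - ", " * ", " / ", " & ", " | ", " = "].any
        (fun op => PySem.Str.isIn op link) then true
    else if (["+", "-", "_", "*", "/", "&", "|", "=", ",", ";",
              "(", ")", "[", "]", "{", "}", ".", "<", ">"].any
               (fun p => PySem.Str.startswith link_clean p)
          || ["+", "-", "_", "*", "/", "&", "|", "=", ",", ";",
              "(", ")", "[", "]", "{", "}", ".", "<", ">"].any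
               (fun p => PySem.Str.endswith link_clean p)) then true
    else if (["this", "self", "that", "null", "true", "false", "void"].contains
               (PySem.Str.lower link_clean)
          || PySem.Str.isIn "valueOf" link_clean
          || PySem.Str.isIn "toString" link_clean
          || PySem.Str.isIn "getString" link_clean) then true
    else if (decide (PySem.Str.len link_clean ≤ 2) || PySem.Str.strIsdigit link_clean) then true
    else if (",;()[]{}.".toList.any (fun char1 =>
               ",;()[]{}.".toList.any (fun char2 =>
                 decide (char1 ≠ char2) && PySem.Str.isIn (String.ofList [char1, char2]) link)))
         then true
    else false

-- ===== PORT B =====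
def pvSpecial (c : Char) : Bool := ",;()[]{}.".toList.contains c
def pvOp (c : Char) : Bool := "+-*/&|=".toList.contains c
def pvEdge (c : Char) : Bool := "+-_*/&|=,;()[]{}.<>".toList.contains c

-- the single pass over link: prev2/prev are the two previously seen characters (none = not yet seen)
def pvScan : Option Char → Option Char → List Char → Bool
  | _, _, [] => false
  | prev2, prev, c :: rest =>
    if prev2 == some ' ' && c == ' ' && prev.any pvOp then true
    else if prev.any pvSpecial && pvSpecial c && prev != some c then true
    else pvScan prev (some c) rest

def should_skip_firestore_code_patterns_py_alt (header : String) (link : String) : Bool :=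
  if !(PySem.Str.startswith header "Firestore_") then false
  else
    let s := PySem.Str.strip link
    if pvScan none none link.toList then true
    else if s.toList.head?.any pvEdge || s.toList.getLast?.any pvEdge then true
    else if (["this", "self", "that", "null", "true", "false", "void"].contains
               (PySem.Str.lower s)
          || PySem.Str.isIn "valueOf" s
          || PySem.Str.isIn "toString" s
          || PySem.Str.isIn "getString" s) then true
    else decide (PySem.Str.len s ≤ 2) || PySem.Str.strIsdigit s

-- ===== PRECONDITION & SPEC =====
def Spec_should_skip_firestore_code_patterns_py (header : String) (link : String) (out : Bool) : Prop := out = should_skip_firestore_code_patterns_py_alt header link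
instance (header : String) (link : String) (out : Bool) : Decidable (Spec_should_skip_firestore_code_patterns_py header link out) := by unfold Spec_should_skip_firestore_code_patterns_py; infer_instance

-- ===== CLAIM (what is proved, stated in full; the proofs are below) =====
def Claim_equal_should_skip_firestore_code_patterns_py : Prop := ∀ (header : String) (link : String), Dom_should_skip_firestore_code_patterns_py header link → Spec_should_skip_firestore_code_patterns_py header link (should_skip_firestore_code_patterns_py header link)

-- ===== LEMMAS AND PROOFS =====

def HasT (l : List Char) : Prop := ∃ y, pvOp y = true ∧ [' ', y, ' '] <:+: l
def HasP (l : List Char) : Prop := ∃ x y, pvSpecial x = true ∧ pvSpecial y = true ∧ x ≠ y ∧ [x, y] <:+: l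

lemma hasT_cons (a : Char) (l : List Char) :
    HasT (a :: l) ↔ (∃ y, pvOp y = true ∧ [' ', y, ' '] <+: a :: l) ∨ HasT l := by
  simp only [HasT, List.infix_cons_iff, and_or_left, exists_or]

lemma hasP_cons (a : Char) (l : List Char) :
    HasP (a :: l) ↔ (∃ x y, pvSpecial x = true ∧ pvSpecial y = true ∧ x ≠ y ∧ [x, y] <+: a :: l) ∨ HasP l := by
  simp only [HasP, List.infix_cons_iff, and_or_left, exists_or]

lemma hasT_short (l : List Char) (h : l.length < 3) : ¬ HasT l := by
  rintro ⟨y, _, hi⟩; have := hi.length_le; simp at this; omega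

lemma hasP_short (l : List Char) (h : l.length < 2) : ¬ HasP l := by
  rintro ⟨x, y, _, _, _, hi⟩; have := hi.length_le; simp at this; omega

lemma scan_some (a b : Char) (cs : List Char) :
    pvScan (some a) (some b) cs = true ↔ HasT (a :: b :: cs) ∨ HasP (b :: cs) := by
  induction cs generalizing a b with
  | nil =>
    simp only [pvScan, Bool.false_eq_true, false_iff]
    rintro (h | h)
    exacts [hasT_short _ (by simp) h, hasP_short _ (by simp) h]
  | cons c rest ih =>
    rw [pvScan]
    by_cases h1 : a = ' ' ∧ c = ' ' ∧ pvOp b = true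
    · obtain ⟨ha, hc, hb⟩ := h1
      subst ha; subst hc
      rw [if_pos (by simp [hb])]
      simp only [true_iff]
      exact Or.inl ⟨b, hb, [], rest, rfl⟩
    · have hcond : (some a == some ' ' && c == ' ' && (some b).any pvOp) = false := by
        simp only [Option.any_some]
        by_cases h2 : a = ' ' <;> by_cases h3 : c = ' ' <;> by_cases h4 : pvOp b = true <;>
          simp_all
      rw [hcond, if_neg (by simp)]
      by_cases h5 : pvSpecial b = true ∧ pvSpecial c = true ∧ b ≠ c
      · obtain ⟨hb, hc, hbc⟩ := h5
        simp only [hb, hc, Option.any_some, Bool.true_and, Bool.and_true]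
        rw [if_pos (by simp [hbc])]
        simp only [true_iff]
        exact Or.inr ⟨b, c, hb, hc, hbc, [], rest, rfl⟩
      · have hcond2 : ((some b).any pvSpecial && pvSpecial c && (some b != some c)) = false := by
          simp only [Option.any_some]
          by_cases h2 : pvSpecial b = true <;> by_cases h3 : pvSpecial c = true <;>
            by_cases h4 : b = c <;> simp_all
        rw [hcond2, if_neg (by simp)]
        rw [ih b c]
        constructor
        · rintro (hT | hP)
          · exact Or.inl ((hasT_cons a _).mpr (Or.inr hT))
          · exact Or.inr ((hasP_cons b _).mpr (Or.inr hP))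
        · rintro (hT | hP)
          · rcases (hasT_cons a _).mp hT with ⟨y, hy, hpre⟩ | hT'
            · exfalso
              rcases hpre with ⟨t, ht⟩
              simp only [List.cons_append, List.cons.injEq] at ht
              obtain ⟨h1', h2', h3', -⟩ := ht
              exact h1 ⟨h1'.symm, h3'.symm, h2' ▸ hy⟩
            · exact Or.inl hT'
          · rcases (hasP_cons b _).mp hP with ⟨x, y, hx, hy, hxy, hpre⟩ | hP'
            · exfalso
              rcases hpre with ⟨t, ht⟩
              simp only [List.cons_append, List.cons.injEq] at ht
              obtain ⟨h1', h2', -⟩ := ht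
              subst h1'; subst h2'; exact h5 ⟨hx, hy, hxy⟩
            · exact Or.inr hP'

lemma scan_none1 (b : Char) (cs : List Char) :
    pvScan none (some b) cs = true ↔ HasT (b :: cs) ∨ HasP (b :: cs) := by
  cases cs with
  | nil =>
    simp only [pvScan, Bool.false_eq_true, false_iff]
    rintro (h | h)
    exacts [hasT_short _ (by simp) h, hasP_short _ (by simp) h]
  | cons c rest =>
    rw [pvScan, if_neg (by simp), ]
    by_cases h5 : pvSpecial b = true ∧ pvSpecial c = true ∧ b ≠ c
    · obtain ⟨hb, hc, hbc⟩ := h5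
      rw [if_pos (by simp [hb, hc, hbc])]
      simp only [true_iff]
      exact Or.inr ⟨b, c, hb, hc, hbc, [], rest, rfl⟩
    · have hcond2 : ((some b).any pvSpecial && pvSpecial c && (some b != some c)) = false := by
        simp only [Option.any_some]
        by_cases h2 : pvSpecial b = true <;> by_cases h3 : pvSpecial c = true <;>
          by_cases h4 : b = c <;> simp_all
      rw [hcond2, if_neg (by simp), scan_some b c rest]
      constructor
      · rintro (hT | hP)
        · exact Or.inl hT
        · exact Or.inr ((hasP_cons b _).mpr (Or.inr hP))
      · rintro (hT | hP)
        · exact Or.inl hT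
        · rcases (hasP_cons b _).mp hP with ⟨x, y, hx, hy, hxy, hpre⟩ | hP'
          · exfalso
            rcases hpre with ⟨t, ht⟩
            simp only [List.cons_append, List.cons.injEq] at ht
            obtain ⟨h1', h2', -⟩ := ht
            subst h1'; subst h2'; exact h5 ⟨hx, hy, hxy⟩
          · exact Or.inr hP'

lemma scan_none (cs : List Char) : pvScan none none cs = true ↔ HasT cs ∨ HasP cs := by
  cases cs with
  | nil =>
    simp only [pvScan, Bool.false_eq_true, false_iff]
    rintro (h | h)
    exacts [hasT_short _ (by simp) h, hasP_short _ (by simp) h]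
  | cons c rest =>
    rw [pvScan, if_neg (by simp), if_neg (by simp), scan_none1 c rest]

lemma ops_iff (link : String) :
    ([" + ", " - ", " * ", " / ", " & ", " | ", " = "].any
      (fun op => PySem.Str.isIn op link)) = true ↔ HasT link.toList := by
  simp only [List.any_cons, List.any_nil, Bool.or_eq_true, Bool.false_eq_true, or_false,
    PySem.Str.isIn_iff_infix]
  show ([' ', '+', ' '] <:+: link.toList ∨ [' ', '-', ' '] <:+: link.toList ∨
        [' ', '*', ' '] <:+: link.toList ∨ [' ', '/', ' '] <:+: link.toList ∨
        [' ', '&', ' '] <:+: link.toList ∨ [' ', '|', ' '] <:+: link.toList ∨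
        [' ', '=', ' '] <:+: link.toList) ↔ _
  constructor
  · rintro (h | h | h | h | h | h | h)
    exacts [⟨'+', by decide, h⟩, ⟨'-', by decide, h⟩, ⟨'*', by decide, h⟩, ⟨'/', by decide, h⟩,
            ⟨'&', by decide, h⟩, ⟨'|', by decide, h⟩, ⟨'=', by decide, h⟩]
  · rintro ⟨y, hy, h⟩
    have : y = '+' ∨ y = '-' ∨ y = '*' ∨ y = '/' ∨ y = '&' ∨ y = '|' ∨ y = '=' := by
      revert hy; simp [pvOp]
    rcases this with rfl | rfl | rfl | rfl | rfl | rfl | rfl <;> tauto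

lemma pairs_iff (link : String) :
    (",;()[]{}.".toList.any (fun char1 =>
       ",;()[]{}.".toList.any (fun char2 =>
         decide (char1 ≠ char2) && PySem.Str.isIn (String.ofList [char1, char2]) link))) = true
      ↔ HasP link.toList := by
  rw [List.any_eq_true]
  constructor
  · rintro ⟨c1, hc1, h⟩
    rw [List.any_eq_true] at h
    obtain ⟨c2, hc2, h⟩ := h
    rw [Bool.and_eq_true, decide_eq_true_iff] at h
    obtain ⟨hne, hin⟩ := h
    rw [PySem.Str.isIn_iff_infix] at hin
    exact ⟨c1, c2, by simpa [pvSpecial] using hc1, by simpa [pvSpecial] using hc2, hne, by simpa using hin⟩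
  · rintro ⟨x, y, hx, hy, hxy, h⟩
    refine ⟨x, by simpa [pvSpecial] using hx, ?_⟩
    rw [List.any_eq_true]
    exact ⟨y, by simpa [pvSpecial] using hy, by simp [hxy, PySem.Chars.isIn_iff_infix, h]⟩

lemma singleton_prefix_iff (x c : Char) (t : List Char) : [x] <+: c :: t ↔ x = c := by
  simp [List.cons_prefix_cons]

lemma singleton_suffix_getLast? (a : Char) (l : List Char) : [a] <:+ l ↔ l.getLast? = some a := by
  rw [← List.reverse_prefix, ← List.head?_reverse]
  cases l.reverse <;> simp [List.cons_prefix_cons, eq_comm]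

lemma start_iff (s : String) :
    (["+", "-", "_", "*", "/", "&", "|", "=", ",", ";",
      "(", ")", "[", "]", "{", "}", ".", "<", ">"].any
       (fun p => PySem.Str.startswith s p)) = s.toList.head?.any pvEdge := by
  cases h : s.toList with
  | nil => simp only [PySem.Str.startswith_eq, h]; decide
  | cons c t =>
    simp only [PySem.Str.startswith_eq, h]
    rw [Bool.eq_iff_iff]
    simp only [List.any_cons, List.any_nil, Bool.or_eq_true, Bool.false_eq_true, or_false,
      PySem.Chars.startswith_iff,
      show ("+" : String).toList = ['+'] from by simp,
      show ("-" : String).toList = ['-'] from by simp,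
      show ("_" : String).toList = ['_'] from by simp,
      show ("*" : String).toList = ['*'] from by simp,
      show ("/" : String).toList = ['/'] from by simp,
      show ("&" : String).toList = ['&'] from by simp,
      show ("|" : String).toList = ['|'] from by simp,
      show ("=" : String).toList = ['='] from by simp,
      show ("," : String).toList = [','] from by simp,
      show (";" : String).toList = [';'] from by simp,
      show ("(" : String).toList = ['('] from by simp,
      show (")" : String).toList = [')'] from by simp,
      show ("[" : String).toList = ['['] from by simp,
      show ("]" : String).toList = [']'] from by simp,
      show ("{" : String).toList = ['{'] from by simp,
      show ("}" : String).toList = ['}'] from by simp,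
      show ("." : String).toList = ['.'] from by simp,
      show ("<" : String).toList = ['<'] from by simp,
      show (">" : String).toList = ['>'] from by simp]
    simp only [singleton_prefix_iff, List.head?_cons, Option.any_some]
    simp [pvEdge, @eq_comm Char c]

lemma end_iff (s : String) :
    (["+", "-", "_", "*", "/", "&", "|", "=", ",", ";",
      "(", ")", "[", "]", "{", "}", ".", "<", ">"].any
       (fun p => PySem.Str.endswith s p)) = s.toList.getLast?.any pvEdge := by
  cases h : s.toList with
  | nil => simp only [PySem.Str.endswith_eq, h]; decide
  | cons c t =>
    simp only [PySem.Str.endswith_eq, h]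
    rw [Bool.eq_iff_iff]
    simp only [List.any_cons, List.any_nil, Bool.or_eq_true, Bool.false_eq_true, or_false,
      PySem.Chars.endswith_iff,
      show ("+" : String).toList = ['+'] from by simp,
      show ("-" : String).toList = ['-'] from by simp,
      show ("_" : String).toList = ['_'] from by simp,
      show ("*" : String).toList = ['*'] from by simp,
      show ("/" : String).toList = ['/'] from by simp,
      show ("&" : String).toList = ['&'] from by simp,
      show ("|" : String).toList = ['|'] from by simp,
      show ("=" : String).toList = ['='] from by simp,
      show ("," : String).toList = [','] from by simp,
      show (";" : String).toList = [';'] from by simp,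
      show ("(" : String).toList = ['('] from by simp,
      show (")" : String).toList = [')'] from by simp,
      show ("[" : String).toList = ['['] from by simp,
      show ("]" : String).toList = [']'] from by simp,
      show ("{" : String).toList = ['{'] from by simp,
      show ("}" : String).toList = ['}'] from by simp,
      show ("." : String).toList = ['.'] from by simp,
      show ("<" : String).toList = ['<'] from by simp,
      show (">" : String).toList = ['>'] from by simp]
    simp only [singleton_suffix_getLast?]
    cases hg : (c :: t).getLast? with
    | none => simp at hg
    | some d => simp [hg, pvEdge, @eq_comm Char d]

lemma scan_eq_ops_or_pairs (link : String) :
    pvScan none none link.toList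
      = (([" + ", " - ", " * ", " / ", " & ", " | ", " = "].any
           (fun op => PySem.Str.isIn op link))
         || (",;()[]{}.".toList.any (fun char1 =>
              ",;()[]{}.".toList.any (fun char2 =>
                decide (char1 ≠ char2) && PySem.Str.isIn (String.ofList [char1, char2]) link)))) := by
  rw [Bool.eq_iff_iff, Bool.or_eq_true, ops_iff, pairs_iff, scan_none]

-- ===== VERDICT (by name: the statement is the Claim_ definition above) =====
theorem should_skip_firestore_code_patterns_py_spec : Claim_equal_should_skip_firestore_code_patterns_py := by
  intro header link _
  unfold Spec_should_skip_firestore_code_patterns_py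
  unfold should_skip_firestore_code_patterns_py should_skip_firestore_code_patterns_py_alt
  by_cases hh : PySem.Str.startswith header "Firestore_" = true
  · simp only [hh, Bool.not_true, Bool.false_eq_true, if_false]
    rw [scan_eq_ops_or_pairs, start_iff, end_iff]
    cases h1 : ([" + ", " - ", " * ", " / ", " & ", " | ", " = "].any
           (fun op => PySem.Str.isIn op link)) <;>
    cases h2 : ((PySem.Str.strip link).toList.head?.any pvEdge) <;>
    cases h3 : ((PySem.Str.strip link).toList.getLast?.any pvEdge) <;>
    cases h4 : (["this", "self", "that", "null", "true", "false", "void"].contains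
               (PySem.Str.lower (PySem.Str.strip link))
          || PySem.Str.isIn "valueOf" (PySem.Str.strip link)
          || PySem.Str.isIn "toString" (PySem.Str.strip link)
          || PySem.Str.isIn "getString" (PySem.Str.strip link)) <;>
    cases h5 : (decide (PySem.Str.len (PySem.Str.strip link) ≤ 2) || PySem.Str.strIsdigit (PySem.Str.strip link)) <;>
    cases h6 : (",;()[]{}.".toList.any (fun char1 =>
               ",;()[]{}.".toList.any (fun char2 =>
                 decide (char1 ≠ char2) && PySem.Str.isIn (String.ofList [char1, char2]) link))) <;>
    simp [h1, h2, h3, h4, h5, h6]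
  · rw [Bool.not_eq_true] at hh
    simp only [hh, Bool.not_false, if_true]
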